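-- pv_equiv track=rewrite | github.com/littson/nanobot | skills/office365-sync/scripts/o365_common.py | sanitize_recipients
-- ===== SOURCE A (Python) =====
-- def sanitize_recipients(raw_values: list[str] | None) -> list[str]:
--     recipients: list[str] = []
--     for raw in raw_values or []:
--         for part in raw.split(","):
--             value = part.strip()
--             if value:
--                 recipients.append(value)
--     return recipients
-- ===== SOURCE B (Python) =====
-- def sanitize_recipients(raw_values):
--     # Character-level state machine: no split()/strip() calls. `cur` holds the
--     # current token stripped on the fly; `pend` buffers interior whitespace that
--     # is only committed when a further non-space character arrives.
--     recipients = []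
--     for raw in raw_values or []:
--         cur = []
--         pend = []
--         for ch in raw:
--             if ch == ',':
--                 if cur:
--                     recipients.append(''.join(cur))
--                 cur = []
--                 pend = []
--             elif ch.isspace():
--                 if cur:
--                     pend.append(ch)
--             else:
--                 cur.extend(pend)
--                 pend = []
--                 cur.append(ch)
--         if cur:
--             recipients.append(''.join(cur))
--     return recipients
-- ===== Notes on version B (the rewrite author's own statement) =====
-- stated objective: alternative
-- what changed: B replaces A's split(',')+strip() library pipeline with a single character-level state machine per raw string: it builds each token incrementally in a `cur` buffer, buffering interior whitespace in `pend` and flushing tokens at commas, so no intermediate substring lists are ever materialised.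
import Mathlib
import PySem

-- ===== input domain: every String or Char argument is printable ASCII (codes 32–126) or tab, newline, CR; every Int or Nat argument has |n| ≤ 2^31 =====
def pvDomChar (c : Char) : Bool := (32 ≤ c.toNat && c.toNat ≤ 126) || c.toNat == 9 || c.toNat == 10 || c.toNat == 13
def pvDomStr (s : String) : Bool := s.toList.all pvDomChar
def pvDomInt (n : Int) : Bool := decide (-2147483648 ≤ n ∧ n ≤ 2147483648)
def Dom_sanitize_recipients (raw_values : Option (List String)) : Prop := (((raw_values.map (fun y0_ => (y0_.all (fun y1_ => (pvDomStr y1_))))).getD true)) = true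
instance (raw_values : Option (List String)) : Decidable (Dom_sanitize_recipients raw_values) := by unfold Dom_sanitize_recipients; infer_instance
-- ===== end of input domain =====

-- B replaces A's split(',')+strip() pipeline with a per-string character-level state machine
-- that builds each stripped token incrementally (objective: alternative, same cost).


-- ===== PORT A =====
def sanitize_recipients (raw_values : Option (List String)) : List String :=
  (raw_values.getD []).foldl
    (fun recipients raw =>
      ((PySem.Str.split? raw ",").getD []).foldl
        (fun recipients part =>
          let value := PySem.Str.strip part
          if value ≠ "" then recipients ++ [value] else recipients)
        recipients)
    []

-- ===== PORT B =====
-- the inner character loop of Source B: `cur` is the token built so far, `pend` the buffered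
-- interior whitespace; emitted tokens are appended to `recipients`
def scanB (recipients : List String) (cur pend : List Char) : List Char → List String
  | [] => if cur ≠ [] then recipients ++ [String.ofList cur] else recipients
  | c :: rest =>
    if c = ',' then
      scanB (if cur ≠ [] then recipients ++ [String.ofList cur] else recipients) [] [] rest
    else if PySem.Chars.isspace c then
      scanB recipients cur (if cur ≠ [] then pend ++ [c] else pend) rest
    else
      scanB recipients (cur ++ pend ++ [c]) [] rest

def sanitize_recipients_alt (raw_values : Option (List String)) : List String :=
  (raw_values.getD []).foldl
    (fun recipients raw => scanB recipients [] [] raw.toList)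
    []

-- ===== PRECONDITION & SPEC =====
def Spec_sanitize_recipients (raw_values : Option (List String)) (out : List String) : Prop := out = sanitize_recipients_alt raw_values
instance (raw_values : Option (List String)) (out : List String) : Decidable (Spec_sanitize_recipients raw_values out) := by unfold Spec_sanitize_recipients; infer_instance

-- ===== CLAIM (what is proved, stated in full; the proofs are below) =====
def Claim_equal_sanitize_recipients : Prop := ∀ (raw_values : Option (List String)), Dom_sanitize_recipients raw_values → Spec_sanitize_recipients raw_values (sanitize_recipients raw_values)

-- ===== LEMMAS AND PROOFS =====

-- the first comma-free segment of a char list, and the remaining segments after the first comma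
def seg1 : List Char → List Char
  | [] => []
  | c :: r => if c = ',' then [] else c :: seg1 r

-- structural splitter on ',' characterising PySem.Chars.splitOn on the single-char separator
def spComma (pre : List Char) : List Char → List (List Char)
  | [] => [pre]
  | x :: rest => if x = ',' then pre :: spComma [] rest else spComma (pre ++ [x]) rest

def segRest : List Char → List (List Char)
  | [] => []
  | c :: r => if c = ',' then spComma [] r else segRest r

theorem go_spec (fuel : Nat) : ∀ (l cur : List Char) (acc : List (List Char)), l.length ≤ fuel →
    PySem.Chars.splitOn.go [','] fuel l cur acc = acc.reverse ++ spComma cur.reverse l := by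
  induction fuel with
  | zero =>
    intro l cur acc h
    have : l = [] := List.length_eq_zero_iff.mp (Nat.le_zero.mp h)
    subst this
    rw [PySem.Chars.splitOn.go.eq_def]
    simp [spComma]
  | succ n ih =>
    intro l cur acc h
    cases l with
    | nil =>
      rw [PySem.Chars.splitOn.go.eq_def]
      simp [spComma]
    | cons c rest =>
      rw [PySem.Chars.splitOn.go.eq_def]
      by_cases hc : c = ','
      · subst hc
        simp only [List.isPrefixOf_cons₂, List.isPrefixOf_nil_left, beq_self_eq_true, Bool.true_and,
          if_true, List.drop_succ_cons, List.drop_zero, List.length_singleton]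
        rw [ih _ _ _ (by simpa using Nat.le_of_succ_le_succ h)]
        simp [spComma]
      · have hpre : [','].isPrefixOf (c :: rest) = false := by
          simp [List.isPrefixOf_cons₂]
          exact fun h' => hc h'.symm
        simp only [hpre, Bool.false_eq_true, if_false]
        rw [ih _ _ _ (by simpa using Nat.le_of_succ_le_succ h)]
        simp [spComma, hc]

theorem splitOn_comma_eq (cs : List Char) : PySem.Chars.splitOn cs [','] = spComma [] cs := by
  have := go_spec (cs.length + 1) cs [] [] (by omega)
  simpa [PySem.Chars.splitOn] using this

-- spComma decomposed as first segment + rest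
theorem spComma_seg (cs : List Char) : ∀ pre, spComma pre cs = (pre ++ seg1 cs) :: segRest cs := by
  induction cs with
  | nil => intro pre; simp [spComma, seg1, segRest]
  | cons c r ih =>
    intro pre
    by_cases hc : c = ','
    · subst hc; simp [spComma, seg1, segRest]
    · simp [spComma, seg1, segRest, hc, ih (pre ++ [c])]

-- the shared strip-and-filter step of A
def stepS (acc : List String) (part : String) : List String :=
  let value := PySem.Str.strip part
  if value ≠ "" then acc ++ [value] else acc

theorem split_getD (s : String) :
    ((PySem.Str.split? s ",").getD []) = (spComma [] s.toList).map String.ofList := by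
  simp [PySem.Str.split?, PySem.Chars.split?, splitOn_comma_eq]

theorem stepS_ofList (acc : List String) (l : List Char) :
    stepS acc (String.ofList l) =
      if PySem.Chars.strip l ≠ [] then acc ++ [String.ofList (PySem.Chars.strip l)] else acc := by
  have h : PySem.Str.strip (String.ofList l) = String.ofList (PySem.Chars.strip l) := by
    simp [PySem.Str.strip]
  simp only [stepS, h]
  by_cases he : PySem.Chars.strip l = []
  · simp [he]
  · simp [he]

theorem strip_ws_cons {c : Char} (hc : PySem.Chars.isspace c = true) (l : List Char) :
    PySem.Chars.strip (c :: l) = PySem.Chars.strip l := by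
  simp [PySem.Chars.strip, PySem.Chars.lstrip, hc]

-- the state invariant of scanB
def InvB (cur pend : List Char) : Prop :=
  pend.all PySem.Chars.isspace = true ∧ (cur = [] → pend = []) ∧
  cur.head?.all (fun c => !PySem.Chars.isspace c) = true ∧
  cur.getLast?.all (fun c => !PySem.Chars.isspace c) = true

theorem strip_cur_pend {cur pend : List Char} (h : InvB cur pend) :
    PySem.Chars.strip (cur ++ pend) = cur := by
  obtain ⟨hws, hemp, hhd, hlast⟩ := h
  cases cur with
  | nil => simp [hemp rfl, PySem.Chars.strip, PySem.Chars.lstrip, PySem.Chars.rstrip]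
  | cons a t =>
    have ha : PySem.Chars.isspace a = false := by simpa using hhd
    have hls : PySem.Chars.lstrip ((a :: t) ++ pend) = (a :: t) ++ pend := by
      simp [PySem.Chars.lstrip, ha]
    have hpendrev : PySem.Chars.rstrip ((a :: t) ++ pend) = PySem.Chars.rstrip (a :: t) := by
      simp only [PySem.Chars.rstrip, List.reverse_append]
      congr 1
      rw [List.dropWhile_append]
      have : List.dropWhile PySem.Chars.isspace pend.reverse = [] := by
        rw [List.dropWhile_eq_nil_iff]
        intro x hx
        exact (List.all_eq_true.mp hws x (List.mem_reverse.mp hx))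
      simp [this]
    have hrt : PySem.Chars.rstrip (a :: t) = a :: t := by
      obtain ⟨b, bs, hrev⟩ : ∃ b bs, (a :: t).reverse = b :: bs := by
        cases hr : (a :: t).reverse with
        | nil => simp at hr
        | cons b bs => exact ⟨b, bs, rfl⟩
      have hlb : (a :: t).getLast? = some b := by
        rw [← List.head?_reverse, hrev]; rfl
      have hb : PySem.Chars.isspace b = false := by
        rw [hlb] at hlast; simpa using hlast
      simp only [PySem.Chars.rstrip, hrev, List.dropWhile_cons, hb]
      simp only [Bool.false_eq_true, if_false, ← hrev, List.reverse_reverse]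
    rw [PySem.Chars.strip, hls, hpendrev, hrt]

-- main invariant: scanB computes the stepS-fold over the comma segments
theorem scanB_spec (cs : List Char) : ∀ (acc : List String) (cur pend : List Char), InvB cur pend →
    scanB acc cur pend cs =
      (segRest cs).foldl (fun a p => stepS a (String.ofList p))
        (stepS acc (String.ofList (cur ++ pend ++ seg1 cs))) := by
  induction cs with
  | nil =>
    intro acc cur pend hinv
    simp only [scanB, seg1, segRest, List.foldl_nil, List.append_nil]
    rw [stepS_ofList, strip_cur_pend hinv]
  | cons c rest ih =>
    intro acc cur pend hinv
    by_cases hc : c = ','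
    · subst hc
      have hflush : (if cur ≠ [] then acc ++ [String.ofList cur] else acc)
          = stepS acc (String.ofList (cur ++ pend)) := by
        rw [stepS_ofList, strip_cur_pend hinv]
      simp only [scanB, if_true, seg1, segRest, List.append_nil]
      rw [ih _ [] [] ⟨rfl, fun _ => rfl, rfl, rfl⟩]
      rw [hflush, spComma_seg rest []]
      simp only [List.foldl_cons, List.nil_append]
    · by_cases hws : PySem.Chars.isspace c = true
      · have hcomma : c ≠ ',' := hc
        simp only [scanB, hcomma, if_false, hws, if_true, seg1, segRest]
        by_cases hcur : cur = []
        · subst hcur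
          have hpend : pend = [] := hinv.2.1 rfl
          subst hpend
          have hstep : stepS acc (String.ofList (c :: seg1 rest))
              = stepS acc (String.ofList (seg1 rest)) := by
            rw [stepS_ofList, stepS_ofList, strip_ws_cons hws]
          simp only [ne_eq, not_true_eq_false, if_false, List.nil_append]
          rw [ih _ [] [] ⟨rfl, fun _ => rfl, rfl, rfl⟩]
          simp only [List.nil_append]
          rw [hstep]
        · simp only [ne_eq, not_false_eq_true, if_true, hcur]
          have hinv' : InvB cur (pend ++ [c]) := by
            obtain ⟨hws', hemp, hhd, hlast⟩ := hinv
            refine ⟨?_, fun h => absurd h hcur, hhd, hlast⟩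
            simp [List.all_append, hws', hws]
          rw [ih _ cur (pend ++ [c]) hinv']
          simp only [List.append_assoc, List.cons_append, List.nil_append]
      · have hns : PySem.Chars.isspace c = false := by simpa using hws
        simp only [scanB, hc, if_false, hns, Bool.false_eq_true, seg1, segRest]
        have hinv' : InvB (cur ++ pend ++ [c]) [] := by
          obtain ⟨hws', hemp, hhd, hlast⟩ := hinv
          refine ⟨rfl, by simp, ?_, ?_⟩
          · cases hcur : cur with
            | nil => simp [hemp hcur, hns]
            | cons a t =>
              rw [hcur] at hhd
              simp only [List.cons_append, List.head?_cons] at hhd ⊢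
              exact hhd
          · rw [List.getLast?_concat]
            simp [hns]
        rw [ih _ (cur ++ pend ++ [c]) [] hinv']
        simp only [List.append_assoc, List.cons_append, List.nil_append, List.append_nil]

theorem inner_eq (acc : List String) (raw : String) :
    ((PySem.Str.split? raw ",").getD []).foldl stepS acc = scanB acc [] [] raw.toList := by
  rw [split_getD, List.foldl_map]
  rw [scanB_spec raw.toList acc [] [] ⟨rfl, fun _ => rfl, rfl, rfl⟩]
  rw [spComma_seg raw.toList []]
  simp

theorem main_thm (raw_values : Option (List String)) :
    sanitize_recipients raw_values = sanitize_recipients_alt raw_values := by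
  unfold sanitize_recipients sanitize_recipients_alt
  congr 1
  funext recipients raw
  exact inner_eq recipients raw

-- ===== VERDICT (by name: the statement is the Claim_ definition above) =====
theorem sanitize_recipients_spec : Claim_equal_sanitize_recipients := by
  intro raw_values _
  unfold Spec_sanitize_recipients
  exact main_thm raw_values
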